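-- pv_equiv track=rewrite | github.com/Megh0202/TC-02 | backend/app/runtime/executor.py | _selector_intents_compatible
-- ===== SOURCE A (Python) =====
-- def _selector_intents_compatible(expected: str, actual: str) -> bool:
--     if expected == actual:
--         return True
--     compatible_groups = (
--         {"language_switcher", "english", "german_locale"},
--         {"popup_accept", "dismiss"},
--     )
--     return any(expected in group and actual in group for group in compatible_groups)
-- ===== SOURCE B (Python) =====
-- def _canonical(intent: str) -> str:
--     # Rewrite each grouped intent to its group representative; everything else
--     # is its own representative.
--     if intent == "english" or intent == "german_locale":
--         return "language_switcher"
--     if intent == "dismiss":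
--         return "popup_accept"
--     return intent
--
--
-- def _selector_intents_compatible(expected: str, actual: str) -> bool:
--     return _canonical(expected) == _canonical(actual)
-- ===== Notes on version B (the rewrite author's own statement) =====
-- stated objective: simpler
-- what changed: Replaces A's equality branch plus any()-scan over tuple-of-sets membership by normalize-then-compare: a branch-only canonicalization function rewrites each grouped intent to its group representative and the function compares the two canonical forms; no sets, no loop, no separate equality case remain.
import Mathlib
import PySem

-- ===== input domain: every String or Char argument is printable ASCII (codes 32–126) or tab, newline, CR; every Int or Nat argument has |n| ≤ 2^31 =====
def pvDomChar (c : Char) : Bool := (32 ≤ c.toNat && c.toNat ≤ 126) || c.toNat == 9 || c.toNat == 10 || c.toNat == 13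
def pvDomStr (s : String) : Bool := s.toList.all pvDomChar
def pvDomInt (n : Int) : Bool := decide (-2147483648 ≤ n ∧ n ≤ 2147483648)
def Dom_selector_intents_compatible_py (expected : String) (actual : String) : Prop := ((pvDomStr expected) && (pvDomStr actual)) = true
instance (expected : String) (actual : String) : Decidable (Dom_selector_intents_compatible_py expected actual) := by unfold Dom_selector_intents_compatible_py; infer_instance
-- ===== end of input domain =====

-- B replaces A's equality branch plus any()-scan over tuple-of-sets membership by
-- normalize-then-compare: a branch-only canonicalization rewrites each grouped intent
-- to its group representative, then the two canonical forms are compared (objective: simpler).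

-- ===== PORT A =====
def selector_intents_compatible_py (expected : String) (actual : String) : Bool :=
  if expected == actual then true
  else
    let compatible_groups : List (PySem.Set String) :=
      [PySem.Set.ofList ["language_switcher", "english", "german_locale"],
       PySem.Set.ofList ["popup_accept", "dismiss"]]
    compatible_groups.any (fun group =>
      PySem.Set.contains group expected && PySem.Set.contains group actual)

-- ===== PORT B =====
-- _canonical of Source B: a branch-only rewrite to the group representative
def pvCanonical (intent : String) : String :=
  if intent == "english" || intent == "german_locale" then "language_switcher"
  else if intent == "dismiss" then "popup_accept"
  else intent

def selector_intents_compatible_py_alt (expected : String) (actual : String) : Bool :=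
  pvCanonical expected == pvCanonical actual

-- ===== PRECONDITION & SPEC =====
def Spec_selector_intents_compatible_py (expected : String) (actual : String) (out : Bool) : Prop := out = selector_intents_compatible_py_alt expected actual
instance (expected : String) (actual : String) (out : Bool) : Decidable (Spec_selector_intents_compatible_py expected actual out) := by unfold Spec_selector_intents_compatible_py; infer_instance

-- ===== CLAIM (what is proved, stated in full; the proofs are below) =====
def Claim_equal_selector_intents_compatible_py : Prop := ∀ (expected : String) (actual : String), Dom_selector_intents_compatible_py expected actual → Spec_selector_intents_compatible_py expected actual (selector_intents_compatible_py expected actual)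

-- ===== LEMMAS AND PROOFS =====

-- every string is classified the same way by B's canonicalization and A's two membership tests
theorem pvClassify (s : String) :
    (pvCanonical s = "language_switcher"
      ∧ PySem.Set.contains (PySem.Set.ofList ["language_switcher", "english", "german_locale"]) s = true
      ∧ PySem.Set.contains (PySem.Set.ofList ["popup_accept", "dismiss"]) s = false)
  ∨ (pvCanonical s = "popup_accept"
      ∧ PySem.Set.contains (PySem.Set.ofList ["language_switcher", "english", "german_locale"]) s = false
      ∧ PySem.Set.contains (PySem.Set.ofList ["popup_accept", "dismiss"]) s = true)
  ∨ (pvCanonical s = s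
      ∧ PySem.Set.contains (PySem.Set.ofList ["language_switcher", "english", "german_locale"]) s = false
      ∧ PySem.Set.contains (PySem.Set.ofList ["popup_accept", "dismiss"]) s = false) := by
  by_cases h1 : s = "language_switcher" <;> by_cases h2 : s = "english" <;>
    by_cases h3 : s = "german_locale" <;> by_cases h4 : s = "popup_accept" <;>
    by_cases h5 : s = "dismiss"
  all_goals try (subst_vars; first | decide | simp_all)
  simp [pvCanonical, h2, h3, h5]

theorem pvKey (e a : String) :
    selector_intents_compatible_py e a = selector_intents_compatible_py_alt e a := by
  have hne : ∀ {g : PySem.Set String} {x y : String},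
      PySem.Set.contains g x = true → PySem.Set.contains g y = false → x ≠ y := by
    intro g x y hx hy
    rintro rfl; rw [hx] at hy; exact Bool.noConfusion hy
  have hL1 : (PySem.Set.ofList ["language_switcher", "english", "german_locale"]).contains
      "language_switcher" = true := by decide
  have hL2 : (PySem.Set.ofList ["popup_accept", "dismiss"]).contains "popup_accept" = true := by
    decide
  rcases pvClassify e with ⟨hg, c1, c2⟩ | ⟨hg, c1, c2⟩ | ⟨hg, c1, c2⟩ <;>
    rcases pvClassify a with ⟨hg', c1', c2'⟩ | ⟨hg', c1', c2'⟩ | ⟨hg', c1', c2'⟩ <;>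
    simp only [selector_intents_compatible_py, selector_intents_compatible_py_alt,
      hg, hg', c1, c2, c1', c2', List.any_cons, List.any_nil, Bool.and_true, Bool.and_false,
      Bool.or_false, Bool.or_true, Bool.and_self] <;>
    first
      | (simp; done)
      | (simp [hne c1 c1']; done)
      | (simp [hne c2 c2']; done)
      | (simp [hne c1 c1', hne hL1 c1']; done)
      | (simp [hne c2 c2', hne hL2 c2']; done)
      | (simp [Ne.symm (hne c1' c1), Ne.symm (hne hL1 c1)]; done)
      | (simp [Ne.symm (hne c2' c2), Ne.symm (hne hL2 c2)]; done)
      | (cases hq : e == a <;> simp [hq])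

-- ===== VERDICT (by name: the statement is the Claim_ definition above) =====
theorem selector_intents_compatible_py_spec : Claim_equal_selector_intents_compatible_py := by
  intro e a _
  unfold Spec_selector_intents_compatible_py
  exact pvKey e a
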